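-- pv_equiv track=rewrite | github.com/CodingThrust/problem-reductions | docs/paper/verify-reductions/adversary_partition_production_planning.py | is_feasible_source
-- ===== SOURCE A (Python) =====
-- def is_feasible_source(sizes):
--     """Check if Partition instance is feasible (subset sums to S/2)."""
--     S = sum(sizes)
--     if S % 2 != 0:
--         return False
--     target = S // 2
--     reachable = {0}
--     for s in sizes:
--         reachable = reachable | {x + s for x in reachable}
--     return target in reachable
-- ===== SOURCE B (Python) =====
-- def _sums(arr):
--     """Set of all subset sums of arr, by divide and conquer."""
--     if len(arr) == 0:
--         return {0}
--     if len(arr) == 1: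
--         return {0, arr[0]}
--     mid = len(arr) // 2
--     left = _sums(arr[:mid])
--     right = _sums(arr[mid:])
--     return {x + y for x in left for y in right}
--
--
-- def is_feasible_source(sizes):
--     S = sum(sizes)
--     if S % 2 != 0:
--         return False
--     return S // 2 in _sums(sizes)
-- ===== Notes on version B (the rewrite author's own statement) =====
-- stated objective: alternative
-- what changed: A's linear forward fold that grows one reachable-sum set element by element is replaced by a divide-and-conquer: recursively compute the subset-sum sets of the two halves and combine them with a pairwise-sum set comprehension.
import Mathlib
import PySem

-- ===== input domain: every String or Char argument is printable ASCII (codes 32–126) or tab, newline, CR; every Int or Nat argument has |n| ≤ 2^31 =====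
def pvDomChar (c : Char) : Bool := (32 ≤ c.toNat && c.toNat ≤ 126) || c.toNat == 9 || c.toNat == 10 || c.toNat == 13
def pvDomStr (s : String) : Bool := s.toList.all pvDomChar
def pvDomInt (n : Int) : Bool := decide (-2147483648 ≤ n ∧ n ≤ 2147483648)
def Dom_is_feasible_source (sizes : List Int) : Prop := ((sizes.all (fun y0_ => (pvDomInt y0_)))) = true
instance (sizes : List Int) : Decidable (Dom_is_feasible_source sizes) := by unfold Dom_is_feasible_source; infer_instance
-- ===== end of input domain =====

-- B replaces A's linear fold over a growing reachable-sum set by a divide-and-conquer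
-- computation of the subset-sum set (alternative decomposition, no speed claim).

-- ===== PORT A =====
def is_feasible_source (sizes : List Int) : Bool :=
  let S := sizes.sum
  if PySem.Int.mod S 2 != 0 then false
  else
    let target := PySem.Int.floordiv S 2
    -- for s in sizes: reachable = reachable | {x + s for x in reachable}
    let reachable : PySem.Set Int :=
      sizes.foldl (fun r s => PySem.Set.union r (PySem.Set.ofList (r.map (· + s))))
        (PySem.Set.ofList [0])
    PySem.Set.contains reachable target

-- ===== PORT B =====
-- _sums(arr): subset sums of arr by divide and conquer (arr[:mid]/arr[mid:] with
-- 0 ≤ mid ≤ len are exactly take/drop; arr[0] on a singleton is its head).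
-- The fuel argument (= arr.length at the call) only makes the recursion structural.
def pvSumsF : Nat → List Int → PySem.Set Int
  | 0, _ => PySem.Set.ofList [0]
  | fuel+1, arr =>
    if arr.length = 0 then PySem.Set.ofList [0]
    else if arr.length = 1 then PySem.Set.ofList [0, arr.headI]
    else
      let mid := arr.length / 2
      let left := pvSumsF fuel (arr.take mid)
      let right := pvSumsF fuel (arr.drop mid)
      PySem.Set.ofList (left.flatMap (fun x => right.map (fun y => x + y)))

def pvSums (arr : List Int) : PySem.Set Int := pvSumsF arr.length arr

def is_feasible_source_alt (sizes : List Int) : Bool :=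
  let S := sizes.sum
  if PySem.Int.mod S 2 != 0 then false
  else PySem.Set.contains (pvSums sizes) (PySem.Int.floordiv S 2)

-- ===== PRECONDITION & SPEC =====
def Spec_is_feasible_source (sizes : List Int) (out : Bool) : Prop := out = is_feasible_source_alt sizes
instance (sizes : List Int) (out : Bool) : Decidable (Spec_is_feasible_source sizes out) := by unfold Spec_is_feasible_source; infer_instance

-- ===== CLAIM (what is proved, stated in full; the proofs are below) =====
def Claim_equal_is_feasible_source : Prop := ∀ (sizes : List Int), Dom_is_feasible_source sizes → Spec_is_feasible_source sizes (is_feasible_source sizes)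

-- ===== LEMMAS AND PROOFS =====

-- A's fold: y is in the final set iff y = x + (sum of a sublist of the remaining input)
theorem mem_foldA (arr : List Int) (r : PySem.Set Int) (y : Int) :
    y ∈ arr.foldl (fun r s => PySem.Set.union r (PySem.Set.ofList (r.map (· + s)))) r ↔
      ∃ x ∈ r, ∃ l : List Int, List.Sublist l arr ∧ y = x + l.sum := by
  induction arr generalizing r with
  | nil =>
    simp only [List.foldl_nil, List.sublist_nil]
    constructor
    · intro hy; exact ⟨y, hy, [], rfl, by simp⟩
    · rintro ⟨x, hx, l, rfl, rfl⟩; simpa using hx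
  | cons s rest ih =>
    simp only [List.foldl_cons, ih]
    constructor
    · rintro ⟨x, hx, l, hl, rfl⟩
      rw [PySem.Set.mem_union] at hx
      rcases hx with hx | hx
      · exact ⟨x, hx, l, hl.cons s, rfl⟩
      · rw [PySem.Set.mem_ofList, List.mem_map] at hx
        rcases hx with ⟨x0, hx0, rfl⟩
        exact ⟨x0, hx0, s :: l, hl.cons₂ s, by simp; ring⟩
    · rintro ⟨x, hx, l, hl, rfl⟩
      rw [List.sublist_cons_iff] at hl
      rcases hl with hl | ⟨l', rfl, hl'⟩
      · exact ⟨x, by rw [PySem.Set.mem_union]; exact Or.inl hx, l, hl, rfl⟩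
      · refine ⟨x + s, ?_, l', hl', by simp; ring⟩
        rw [PySem.Set.mem_union]
        exact Or.inr (by rw [PySem.Set.mem_ofList, List.mem_map]; exact ⟨x, hx, rfl⟩)

-- B's recursion: y is in pvSumsF fuel arr (fuel ≥ length) iff y is the sum of a sublist of arr
theorem mem_pvSumsF (fuel : Nat) (arr : List Int) (y : Int) (hf : arr.length ≤ fuel) :
    y ∈ pvSumsF fuel arr ↔ ∃ l : List Int, List.Sublist l arr ∧ y = l.sum := by
  induction fuel generalizing arr y with
  | zero =>
    have h0 : arr = [] := List.length_eq_zero_iff.mp (Nat.le_zero.mp hf)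
    subst h0
    simp [pvSumsF, PySem.Set.mem_ofList, List.sublist_nil]
  | succ fuel ih =>
    rw [pvSumsF]
    by_cases h0 : arr.length = 0
    · rw [if_pos h0]
      rw [List.length_eq_zero_iff] at h0
      subst h0
      simp [PySem.Set.mem_ofList, List.sublist_nil]
    · rw [if_neg h0]
      by_cases h1 : arr.length = 1
      · rw [if_pos h1]
        rcases List.length_eq_one_iff.mp h1 with ⟨a, rfl⟩
        simp only [PySem.Set.mem_ofList, List.headI]
        constructor
        · intro h
          rcases List.mem_pair.mp h with h2 | h2
          · exact ⟨[], List.nil_sublist _, by simp [h2]⟩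
          · exact ⟨[a], List.Sublist.refl _, by simp [h2]⟩
        · rintro ⟨l, hl, rfl⟩
          rcases List.sublist_cons_iff.mp hl with h | ⟨l', hle, hl'⟩
          · rw [List.sublist_nil.mp h]; exact List.mem_cons_self
          · rw [hle, List.sublist_nil.mp hl']; simp
      · rw [if_neg h1]
        have hL : (arr.take (arr.length / 2)).length ≤ fuel := by
          simp only [List.length_take]; omega
        have hR : (arr.drop (arr.length / 2)).length ≤ fuel := by
          simp only [List.length_drop]; omega
        simp only [PySem.Set.mem_ofList, List.mem_flatMap, List.mem_map]
        constructor
        · rintro ⟨x, hx, z, hz, rfl⟩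
          rcases (ih _ x hL).mp hx with ⟨l1, hl1, rfl⟩
          rcases (ih _ z hR).mp hz with ⟨l2, hl2, rfl⟩
          refine ⟨l1 ++ l2, ?_, by simp⟩
          have := List.Sublist.append hl1 hl2
          simpa [List.take_append_drop] using this
        · rintro ⟨l, hl, rfl⟩
          rw [← List.take_append_drop (arr.length / 2) arr, List.sublist_append_iff] at hl
          rcases hl with ⟨l1, l2, rfl, hl1, hl2⟩
          exact ⟨l1.sum, (ih _ _ hL).mpr ⟨l1, hl1, rfl⟩,
                 l2.sum, (ih _ _ hR).mpr ⟨l2, hl2, rfl⟩, by simp⟩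

theorem mem_pvSums (arr : List Int) (y : Int) :
    y ∈ pvSums arr ↔ ∃ l : List Int, List.Sublist l arr ∧ y = l.sum :=
  mem_pvSumsF arr.length arr y (Nat.le_refl _)

-- ===== VERDICT (by name: the statement is the Claim_ definition above) =====
theorem is_feasible_source_spec : Claim_equal_is_feasible_source := by
  intro sizes _
  unfold Spec_is_feasible_source is_feasible_source is_feasible_source_alt
  by_cases hpar : PySem.Int.mod sizes.sum 2 = 0
  · simp only [hpar, bne_self_eq_false, Bool.false_eq_true, if_false]
    apply Bool.eq_iff_iff.mpr
    rw [PySem.Set.contains_iff, PySem.Set.contains_iff, mem_foldA, mem_pvSums]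
    constructor
    · rintro ⟨x, hx, l, hl, hy⟩
      simp only [PySem.Set.mem_ofList, List.mem_singleton] at hx
      exact ⟨l, hl, by rw [hy, hx, zero_add]⟩
    · rintro ⟨l, hl, hy⟩
      exact ⟨0, by simp [PySem.Set.mem_ofList], l, hl, by rw [hy, zero_add]⟩
  · simp only [bne_iff_ne.mpr hpar, if_true]
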